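-- pv_equiv track=rewrite | github.com/AESpider/steg | white_space.py | reveal_mid_text
-- ===== SOURCE A (Python) =====
-- from typing import List, Optional
--
-- def bits_to_text(bits: str) -> str:
--     """Convert binary string to text (pad to multiple of 8)."""
--     # Pad to multiple of 8
--     if len(bits) % 8:
--         bits += '0' * (8 - len(bits) % 8)
--
--     # Convert each 8-bit chunk to character
--     chars = []
--     for i in range(0, len(bits), 8):
--         byte = bits[i:i+8]
--         chars.append(chr(int(byte, 2)))
--
--     return ''.join(chars)
--
-- def reveal_mid_text(lines: List[str]) -> str:
--     """Extract message from inter-word spaces."""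
--     bits = []
--
--     for line in lines:
--         i = 0
--         while i < len(line):
--             if line[i] == ' ':
--                 # Check if double space
--                 if i + 1 < len(line) and line[i + 1] == ' ':
--                     bits.append('1')
--                     i += 2
--                 else:
--                     bits.append('0')
--                     i += 1
--             else:
--                 i += 1
--
--     return bits_to_text(''.join(bits))
-- ===== SOURCE B (Python) =====
-- from typing import List
--
-- def _bits_stream_to_text(bits: str) -> str:
--     """Streaming bit-to-char conversion: emit a char every 8 bits, left-pad-shift the tail."""
--     out = []
--     acc = 0
--     n = 0
--     for b in bits:
--         acc = acc * 2 + (1 if b == '1' else 0)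
--         n += 1
--         if n == 8:
--             out.append(chr(acc))
--             acc = 0
--             n = 0
--     if n:
--         out.append(chr(acc << (8 - n)))
--     return ''.join(out)
--
-- def reveal_mid_text(lines: List[str]) -> str:
--     """Extract message from inter-word spaces (run-length grouping pass)."""
--     pieces = []
--     for line in lines:
--         run = 0
--         for ch in line:
--             if ch == ' ':
--                 run += 1
--             else:
--                 pieces.append('1' * (run // 2) + '0' * (run % 2))
--                 run = 0
--         pieces.append('1' * (run // 2) + '0' * (run % 2))
--     return _bits_stream_to_text(''.join(pieces))
-- ===== Notes on version B (the rewrite author's own statement) =====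
-- stated objective: alternative
-- what changed: B replaces A's index-based pairing state machine with a run-length grouping pass (each maximal space run of length k contributes '1'*(k//2)+'0'*(k%2)) and replaces bits_to_text's pad-then-slice 8-chunking with a streaming accumulator that emits a char every 8 bits and shifts the tail.
import Mathlib
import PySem

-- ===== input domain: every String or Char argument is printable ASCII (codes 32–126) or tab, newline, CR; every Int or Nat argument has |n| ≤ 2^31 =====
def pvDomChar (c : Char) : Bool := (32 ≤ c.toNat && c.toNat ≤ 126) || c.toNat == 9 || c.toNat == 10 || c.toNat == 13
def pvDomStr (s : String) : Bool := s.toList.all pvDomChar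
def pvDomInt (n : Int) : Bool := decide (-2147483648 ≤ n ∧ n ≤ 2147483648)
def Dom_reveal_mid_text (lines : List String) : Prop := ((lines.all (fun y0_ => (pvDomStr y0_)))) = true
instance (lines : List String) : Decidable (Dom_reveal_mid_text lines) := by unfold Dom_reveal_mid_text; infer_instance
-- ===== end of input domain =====

-- B changes the decomposition: run-length grouping of space runs plus a streaming
-- 8-bit accumulator, instead of A's index pairing state machine and pad-then-slice chunking.

-- ===== PORT A =====

-- the inner 'while i < len(line)' loop of A, on the remaining characters of the line
def pvA_lineBits : List Char → List Char
  | [] => []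
  | c :: rest =>
    if c = ' ' then
      match rest with
      | c2 :: rest2 =>
        if c2 = ' ' then '1' :: pvA_lineBits rest2       -- double space: '1', i += 2
        else '0' :: pvA_lineBits (c2 :: rest2)           -- single space: '0', i += 1
      | [] => ['0']                                      -- single space at end of line
    else pvA_lineBits rest

-- bits_to_text: pad to a multiple of 8, then 'for i in range(0, len(bits), 8)' take bits[i:i+8].
-- int(byte, 2) is ported as a binary fold; exact here since byte consists only of '0'/'1'.
def pvA_bitsToText (bits : List Char) : List Char :=
  let padded := if bits.length % 8 ≠ 0 then bits ++ List.replicate (8 - bits.length % 8) '0' else bits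
  (PySem.List.pyRange 0 (padded.length : Int) 8).foldl
    (fun chars i =>
      chars ++ [Char.ofNat ((PySem.List.slice padded (some i) (some (i + 8))).foldl
        (fun a c => a * 2 + (if c = '1' then 1 else 0)) 0)]) []

def reveal_mid_text (lines : List String) : String :=
  String.mk (pvA_bitsToText (lines.foldl (fun bits line => bits ++ pvA_lineBits line.toList) []))

-- ===== PORT B =====

-- bits contributed by one maximal run of spaces of length 'run'
def pvB_emit (run : Nat) : List Char :=
  List.replicate (run / 2) '1' ++ List.replicate (run % 2) '0'

-- one pass over a line keeping the current space-run length, flushing at non-space and at end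
def pvB_lineBits : List Char → Nat → List Char
  | [], run => pvB_emit run
  | c :: rest, run =>
    if c = ' ' then pvB_lineBits rest (run + 1)
    else pvB_emit run ++ pvB_lineBits rest 0

-- streaming bit-to-char conversion: emit a char every 8 bits, left-shift the tail
def pvB_stream : List Char → Nat → Nat → List Char
  | [], acc, n => if n ≠ 0 then [Char.ofNat (acc <<< (8 - n))] else []
  | b :: rest, acc, n =>
    let acc' := acc * 2 + (if b = '1' then 1 else 0)
    if n + 1 = 8 then Char.ofNat acc' :: pvB_stream rest 0 0
    else pvB_stream rest acc' (n + 1)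

def reveal_mid_text_alt (lines : List String) : String :=
  String.mk (pvB_stream (lines.foldl (fun bits line => bits ++ pvB_lineBits line.toList 0) []) 0 0)

-- ===== PRECONDITION & SPEC =====
def Spec_reveal_mid_text (lines : List String) (out : String) : Prop := out = reveal_mid_text_alt lines
instance (lines : List String) (out : String) : Decidable (Spec_reveal_mid_text lines out) := by unfold Spec_reveal_mid_text; infer_instance

-- ===== CLAIM (what is proved, stated in full; the proofs are below) =====
def Claim_equal_reveal_mid_text : Prop := ∀ (lines : List String), Dom_reveal_mid_text lines → Spec_reveal_mid_text lines (reveal_mid_text lines)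

-- ===== LEMMAS AND PROOFS =====

-- proof-side helpers
def pvParse (acc : Nat) (l : List Char) : Nat :=
  l.foldl (fun a c => a * 2 + (if c = '1' then 1 else 0)) acc

def pvChunks : List Char → List Char
  | [] => []
  | c :: rest =>
    Char.ofNat (pvParse 0 ((c :: rest).take 8)) :: pvChunks ((c :: rest).drop 8)
termination_by l => l.length
decreasing_by simp

-- ---- stage 1: the bit lists agree ----

theorem pvB_emit_zero : pvB_emit 0 = [] := by simp [pvB_emit]

theorem pvB_emit_one : pvB_emit 1 = ['0'] := by simp [pvB_emit]

theorem pvB_emit_succ2 (k : Nat) : pvB_emit (k + 2) = '1' :: pvB_emit k := by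
  unfold pvB_emit
  have h1 : (k + 2) / 2 = k / 2 + 1 := by omega
  have h2 : (k + 2) % 2 = k % 2 := by omega
  rw [h1, h2, List.replicate_succ]
  simp

theorem pvA_spaces : ∀ k, pvA_lineBits (List.replicate k ' ') = pvB_emit k
  | 0 => by simp [pvA_lineBits, pvB_emit_zero]
  | 1 => by simp [pvA_lineBits, pvB_emit_one]
  | (k + 2) => by
    have ih := pvA_spaces k
    rw [pvB_emit_succ2]
    simp [List.replicate_succ, pvA_lineBits]
    cases k with
    | zero => simp [pvA_lineBits] at ih ⊢; exact ih
    | succ m => simp [List.replicate_succ, pvA_lineBits] at ih ⊢; exact ih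

theorem pvA_lineBits_cons_ne (c : Char) (hc : c ≠ ' ') (rest : List Char) :
    pvA_lineBits (c :: rest) = pvA_lineBits rest := by
  rw [pvA_lineBits.eq_def]
  simp [hc]

theorem pvA_spaces_cons (c : Char) (hc : c ≠ ' ') (rest : List Char) :
    ∀ k, pvA_lineBits (List.replicate k ' ' ++ c :: rest) = pvB_emit k ++ pvA_lineBits rest
  | 0 => by simp [pvA_lineBits_cons_ne c hc, pvB_emit_zero]
  | 1 => by
    simp only [List.replicate_succ, List.replicate_zero, List.nil_append, List.cons_append,
      pvB_emit_one]
    rw [pvA_lineBits.eq_def]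
    simp [hc, pvA_lineBits_cons_ne c hc rest]
  | (k + 2) => by
    have ih := pvA_spaces_cons c hc rest k
    rw [pvB_emit_succ2]
    simp [List.replicate_succ, pvA_lineBits] at ih ⊢
    exact ih

theorem pvB_line (cs : List Char) :
    ∀ run, pvB_lineBits cs run = pvA_lineBits (List.replicate run ' ' ++ cs) := by
  induction cs with
  | nil => intro run; simp [pvB_lineBits, pvA_spaces]
  | cons c rest ih =>
    intro run
    by_cases hc : c = ' '
    · subst hc
      have : List.replicate run ' ' ++ ' ' :: rest = List.replicate (run + 1) ' ' ++ rest := by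
        rw [List.replicate_succ']; simp
      rw [this, pvB_lineBits]
      simp [ih (run + 1)]
    · rw [pvB_lineBits, pvA_spaces_cons c hc rest run]
      simp [hc, ih 0, pvA_lineBits]

theorem pvLineBits_eq (cs : List Char) : pvA_lineBits cs = pvB_lineBits cs 0 := by
  rw [pvB_line cs 0]; simp

theorem pvBits_eq (lines : List String) :
    ∀ init, lines.foldl (fun bits line => bits ++ pvA_lineBits line.toList) init
      = lines.foldl (fun bits line => bits ++ pvB_lineBits line.toList 0) init := by
  induction lines with
  | nil => intro init; rfl
  | cons l rest ih => intro init; simp only [List.foldl_cons, pvLineBits_eq, ih]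

-- ---- stage 2: pad-then-chunk equals the stream ----

theorem pvParse_cons (acc : Nat) (c : Char) (l : List Char) :
    pvParse acc (c :: l) = pvParse (acc * 2 + (if c = '1' then 1 else 0)) l := rfl

theorem pvParse_zeros : ∀ (p : Nat) (acc : Nat), pvParse acc (List.replicate p '0') = acc * 2 ^ p
  | 0, acc => by simp [pvParse]
  | (p + 1), acc => by
    rw [List.replicate_succ, pvParse_cons, pvParse_zeros p]
    simp
    ring

theorem pvStreamChunk : ∀ (l : List Char) (rest : List Char) (acc n : Nat),
    n + l.length = 8 → l ≠ [] →
    pvB_stream (l ++ rest) acc n = Char.ofNat (pvParse acc l) :: pvB_stream rest 0 0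
  | [], _, _, _, _, hne => absurd rfl hne
  | b :: t, rest, acc, n, hlen, _ => by
    cases t with
    | nil =>
      have hn : n + 1 = 8 := by simpa using hlen
      simp only [List.cons_append, List.nil_append, pvB_stream, hn, if_pos rfl]
      rfl
    | cons b2 t2 =>
      have hn : n + 1 ≠ 8 := by simp at hlen; omega
      rw [pvParse_cons, ← pvStreamChunk (b2 :: t2) rest _ (n + 1) (by simp at hlen ⊢; omega)
        (by simp)]
      simp only [List.cons_append, pvB_stream, if_neg hn]

theorem pvStreamPad : ∀ (l : List Char) (acc n p : Nat),
    n < 8 → p < 8 → (n + l.length + p) % 8 = 0 →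
    pvB_stream (l ++ List.replicate p '0') acc n = pvB_stream l acc n
  | [], acc, n, p, hn, hp, hmod => by
    simp only [List.nil_append, List.length_nil] at hmod ⊢
    rcases Nat.eq_zero_or_pos p with hp0 | hppos
    · subst hp0; rfl
    · have h8 : n + p = 8 := by omega
      have hn0 : n ≠ 0 := by omega
      rw [show List.replicate p '0' = List.replicate p '0' ++ ([] : List Char) by simp,
        pvStreamChunk _ _ acc n (by simp; omega) (by simp; omega)]
      rw [pvParse_zeros]
      simp [pvB_stream, hn0, Nat.shiftLeft_eq, show 8 - n = p by omega]
  | c :: rest, acc, n, p, hn, hp, hmod => by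
    simp only [List.cons_append, pvB_stream]
    by_cases h8 : n + 1 = 8
    · rw [if_pos h8, if_pos h8,
        pvStreamPad rest 0 0 p (by omega) hp (by simp at hmod ⊢; omega)]
    · rw [if_neg h8, if_neg h8,
        pvStreamPad rest _ (n + 1) p (by omega) hp (by simp at hmod ⊢; omega)]

theorem pvChunks_eq_stream : ∀ (l : List Char), l.length % 8 = 0 → pvChunks l = pvB_stream l 0 0
  | [], _ => by simp [pvChunks, pvB_stream]
  | c :: rest, h => by
    have h' : rest.length + 1 ≡ 0 [MOD 8] := by simpa [Nat.ModEq, List.length_cons] using h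
    have hlen : 8 ≤ (c :: rest).length := by
      have := h'; simp only [Nat.ModEq] at this; simp only [List.length_cons]; omega
    rw [pvChunks]
    have hd := pvChunks_eq_stream ((c :: rest).drop 8) (by
      have := h'; simp only [Nat.ModEq] at this
      simp only [List.length_drop, List.length_cons]; omega)
    rw [hd]
    have hlen' : 8 ≤ rest.length + 1 := by simpa using hlen
    conv_rhs => rw [show c :: rest = (c :: rest).take 8 ++ (c :: rest).drop 8 from
      (List.take_append_drop 8 _).symm]
    rw [pvStreamChunk _ _ 0 0
      (by simp only [Nat.zero_add, List.length_take, List.length_cons]; omega) (by simp)]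
termination_by l => l.length
decreasing_by simp

theorem pvRange8_cons (a b : Int) (h : a < b) :
    PySem.List.pyRange a b 8 = a :: PySem.List.pyRange (a + 8) b 8 := by
  rw [PySem.List.pyRange_of_pos _ _ (by norm_num : (0:Int) < 8),
    PySem.List.pyRange_of_pos _ _ (by norm_num : (0:Int) < 8), if_pos h]
  have hc : ((b - a + 8 - 1) / 8).toNat
      = (if a + 8 < b then ((b - (a + 8) + 8 - 1) / 8).toNat else 0) + 1 := by
    split_ifs with h2 <;> omega
  rw [hc, List.range_succ_eq_map, List.map_cons, List.map_map]
  congr 1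
  · norm_num
  · refine List.map_congr_left ?_
    intro k _
    simp only [Function.comp]
    push_cast
    ring

theorem pvFoldA : ∀ (fuel : Nat) (l : List Char) (i : Nat) (acc0 : List Char),
    l.length - i ≤ fuel →
    (PySem.List.pyRange (i : Int) (l.length : Int) 8).foldl
      (fun chars j =>
        chars ++ [Char.ofNat ((PySem.List.slice l (some j) (some (j + 8))).foldl
          (fun a c => a * 2 + (if c = '1' then 1 else 0)) 0)]) acc0
    = acc0 ++ pvChunks (l.drop i) := by
  intro fuel
  induction fuel with
  | zero =>
    intro l i acc0 hfuel
    have hle : l.length ≤ i := by omega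
    rw [PySem.List.pyRange_of_pos _ _ (by norm_num : (0:Int) < 8)]
    rw [if_neg (by exact_mod_cast Nat.not_lt.mpr hle)]
    simp [List.drop_eq_nil_of_le hle, pvChunks]
  | succ fuel ih =>
    intro l i acc0 hfuel
    by_cases hlt : i < l.length
    · rw [pvRange8_cons _ _ (by exact_mod_cast hlt), List.foldl_cons]
      have hstep : ((i : Int) + 8) = ((i + 8 : Nat) : Int) := by push_cast; ring
      rw [hstep, ih l (i + 8) _ (by omega)]
      have hslice : PySem.List.slice l (some (i : Int)) (some ((i + 8 : Nat) : Int))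
          = (l.drop i).take 8 := by
        rw [show ((i + 8 : Nat) : Int) = ((i : Nat) : Int) + ((8 : Nat) : Int) by push_cast; ring,
          PySem.List.slice_natCast_add]
      rw [hslice]
      cases hdi : l.drop i with
      | nil => exfalso; have := congrArg List.length hdi; simp at this; omega
      | cons c rest =>
        have hdd : List.drop 8 (c :: rest) = l.drop (i + 8) := by
          rw [← hdi, List.drop_drop, Nat.add_comm]
        rw [pvChunks, hdd]
        simp [pvParse, List.append_assoc]
    · have hle : l.length ≤ i := by omega
      rw [PySem.List.pyRange_of_pos _ _ (by norm_num : (0:Int) < 8)]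
      rw [if_neg (by exact_mod_cast Nat.not_lt.mpr hle)]
      simp [List.drop_eq_nil_of_le hle, pvChunks]

theorem pvBitsToText_eq (bits : List Char) : pvA_bitsToText bits = pvB_stream bits 0 0 := by
  unfold pvA_bitsToText
  by_cases h : bits.length % 8 = 0
  · simp only [h, ne_eq, not_true_eq_false, if_neg, ite_false]
    have := pvFoldA bits.length bits 0 [] (by omega)
    rw [Nat.cast_zero] at this
    rw [this]
    simp [pvChunks_eq_stream bits h]
  · simp only [ne_eq, h, not_false_eq_true, if_pos, ite_true]
    set p := 8 - bits.length % 8 with hp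
    set padded := bits ++ List.replicate p '0' with hpadded
    have hplen : padded.length = bits.length + p := by simp [hpadded]
    have hpmod : padded.length % 8 = 0 := by rw [hplen]; omega
    have := pvFoldA padded.length padded 0 [] (by omega)
    rw [Nat.cast_zero] at this
    rw [this]
    simp only [List.drop_zero, List.nil_append]
    rw [pvChunks_eq_stream padded hpmod, hpadded,
      pvStreamPad bits 0 0 p (by omega) (by omega) (by omega)]

-- ===== VERDICT (by name: the statement is the Claim_ definition above) =====
theorem reveal_mid_text_spec : Claim_equal_reveal_mid_text := by
  intro lines _
  unfold Spec_reveal_mid_text reveal_mid_text reveal_mid_text_alt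
  rw [pvBits_eq lines [], pvBitsToText_eq]
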